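-- pv_equiv track=rewrite | github.com/mattmalcher/ski-display | display/animations.py | _compile_frame
-- ===== SOURCE A (Python) =====
-- def _compile_frame(rows: list) -> list:
--     h = len(rows)
--     w = max(len(r) for r in rows)
--     cols = []
--     for c in range(w):
--         b = 0
--         for r in range(h):
--             ch = rows[r][c] if c < len(rows[r]) else '.'
--             if ch == '#':
--                 b |= (1 << r)
--         cols.append(b)
--     return cols
-- ===== SOURCE B (Python) =====
-- def _compile_frame(rows: list) -> list:
--     w = max(len(r) for r in rows)
--     cols = [0] * w
--     for r, row in enumerate(rows):
--         for c, ch in enumerate(row):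
--             if ch == '#':
--                 cols[c] |= (1 << r)
--     return cols
-- ===== Notes on version B (the rewrite author's own statement) =====
-- stated objective: alternative
-- what changed: Instead of building each column bit-by-bit with a per-cell bounds check over a column-major double loop, B preallocates cols = [0]*w and scatters bits row-major (cols[c] |= 1<<r only on '#' cells), so the per-cell bounds check and the '.'-default comparison disappear.
import Mathlib
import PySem

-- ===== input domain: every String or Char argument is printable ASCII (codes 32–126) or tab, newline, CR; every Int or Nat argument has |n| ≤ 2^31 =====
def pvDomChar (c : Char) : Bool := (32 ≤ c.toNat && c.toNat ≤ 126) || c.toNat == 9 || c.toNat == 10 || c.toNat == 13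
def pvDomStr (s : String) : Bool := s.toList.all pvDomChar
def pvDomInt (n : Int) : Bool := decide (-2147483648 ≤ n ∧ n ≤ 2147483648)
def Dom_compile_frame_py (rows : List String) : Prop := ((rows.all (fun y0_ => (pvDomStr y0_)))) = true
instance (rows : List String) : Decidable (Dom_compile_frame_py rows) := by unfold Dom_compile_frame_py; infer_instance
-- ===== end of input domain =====

-- B replaces A's column-major per-column bit accumulation (with a per-cell bounds check)
-- by a preallocated [0]*w list filled row-major, OR-ing 1<<r into cols[c] only on '#' cells.

-- ===== PORT A =====
def compile_frame_py (rows : List String) : List Int :=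
  let h := rows.length
  -- w = max(len(r) for r in rows); on rows = [] Python raises ValueError (excluded by Pre_)
  let w := ((rows.map (fun r => r.toList.length)).max?).getD 0
  (List.range w).foldl (fun cols c =>
    let b := (List.range h).foldl (fun b r =>
      let row := (rows.getD r "").toList   -- rows[r]: r < h always, so getD is exact
      let ch := if c < row.length then row.getD c '.' else '.'
      if ch = '#' then PySem.Int.bor b ((1 : Int) <<< r) else b) 0
    cols ++ [b]) []

-- ===== PORT B =====
-- inner loop of B: for c, ch in enumerate(row): if ch == '#': cols[c] |= (1 << r)
def pvScatterRowFn (r : Nat) (cols : List Int) (row : List Char) : List Int :=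
  (PySem.List.enumerate row).foldl (fun cols q =>
    if q.2 = '#' then
      PySem.List.pySetD cols q.1
        (PySem.Int.bor (PySem.List.pyGetD cols q.1 0) ((1 : Int) <<< r))
    else cols) cols

def compile_frame_py_alt (rows : List String) : List Int :=
  let w := ((rows.map (fun r => r.toList.length)).max?).getD 0
  -- row index p.1 is ≥ 0 (enumerate from 0), so .toNat is exact for 1 << r
  (PySem.List.enumerate rows).foldl
    (fun cols p => pvScatterRowFn p.1.toNat cols p.2.toList)
    (List.replicate w 0)

-- ===== PRECONDITION & SPEC =====
-- Pre_ excludes only rows = [], on which Python A raises ValueError (max() of an empty sequence); B raises there too.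
def Pre_compile_frame_py (rows : List String) : Prop := rows ≠ []
instance (rows : List String) : Decidable (Pre_compile_frame_py rows) := by unfold Pre_compile_frame_py; infer_instance
def pvWitness_compile_frame_py : List String := ["#.", ".#"]

def Spec_compile_frame_py (rows : List String) (out : List Int) : Prop := out = compile_frame_py_alt rows
instance (rows : List String) (out : List Int) : Decidable (Spec_compile_frame_py rows out) := by unfold Spec_compile_frame_py; infer_instance

-- ===== CLAIM (what is proved, stated in full; the proofs are below) =====
def Claim_equal_compile_frame_py : Prop := ∀ (rows : List String), Dom_compile_frame_py rows → Pre_compile_frame_py rows → Spec_compile_frame_py rows (compile_frame_py rows)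

-- ===== LEMMAS AND PROOFS =====

-- the effect on column c of visiting one row with row index r (both programs perform exactly this)
def pvStep (row : List Char) (r c : Nat) (b : Int) : Int :=
  if (if c < row.length then row.getD c '.' else '.') = '#' then PySem.Int.bor b ((1 : Int) <<< r) else b

-- the value of column c after visiting all rows, first row carrying index r
def pvG : List String → Nat → Nat → Int → Int
  | [], _, _, b => b
  | row :: rest, r, c, b => pvG rest (r + 1) c (pvStep row.toList r c b)

theorem pvInnerA (rows : List String) (c : Nat) : ∀ (r0 : Nat) (b : Int),
    (List.range rows.length).foldl (fun b r =>
      let row := (rows.getD r "").toList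
      let ch := if c < row.length then row.getD c '.' else '.'
      if ch = '#' then PySem.Int.bor b ((1 : Int) <<< (r0 + r)) else b) b
    = pvG rows r0 c b := by
  induction rows with
  | nil => intro r0 b; rfl
  | cons row rest ih =>
    intro r0 b
    simp only [List.length_cons, List.range_succ_eq_map, List.foldl_cons, List.foldl_map]
    simp only [List.getD_cons_zero, List.getD_cons_succ, Nat.add_zero, Nat.succ_eq_add_one]
    have harith : (fun (b : Int) (r : Nat) =>
        let rw' := (rest.getD r "").toList
        let ch := if c < rw'.length then rw'.getD c '.' else '.'
        if ch = '#' then PySem.Int.bor b ((1 : Int) <<< (r0 + (r + 1))) else b)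
        = (fun (b : Int) (r : Nat) =>
        let rw' := (rest.getD r "").toList
        let ch := if c < rw'.length then rw'.getD c '.' else '.'
        if ch = '#' then PySem.Int.bor b ((1 : Int) <<< ((r0 + 1) + r)) else b) := by
      funext b r
      have : r0 + (r + 1) = (r0 + 1) + r := by omega
      rw [this]
    rw [show pvG (row :: rest) r0 c b = pvG rest (r0 + 1) c (pvStep row.toList r0 c b) from rfl,
        ← ih (r0 + 1) (pvStep row.toList r0 c b)]
    simp only [pvStep]
    rw [harith]

theorem pvLemA (rows : List String) :
    compile_frame_py rows
      = (List.range (((rows.map (fun r => r.toList.length)).max?).getD 0)).map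
          (fun c => pvG rows 0 c 0) := by
  unfold compile_frame_py
  rw [PySem.List.foldl_append_singleton_eq_map]
  simp only [List.nil_append]
  refine List.map_congr_left (fun c _ => ?_)
  have := pvInnerA rows c 0 0
  simpa using this

-- effect of B's inner loop (one row scattered, bit 1 <<< r, chars offset by k) on every column
theorem pvScatterRow (r : Nat) : ∀ (row : List Char) (k : Nat) (cols : List Int),
    k + row.length ≤ cols.length →
    (((PySem.List.enumerate row (k : Int)).foldl (fun cols q =>
        if q.2 = '#' then
          PySem.List.pySetD cols q.1
            (PySem.Int.bor (PySem.List.pyGetD cols q.1 0) ((1 : Int) <<< r))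
        else cols) cols).length = cols.length ∧
     ∀ c : Nat, ((PySem.List.enumerate row (k : Int)).foldl (fun cols q =>
        if q.2 = '#' then
          PySem.List.pySetD cols q.1
            (PySem.Int.bor (PySem.List.pyGetD cols q.1 0) ((1 : Int) <<< r))
        else cols) cols).getD c 0 =
        if k ≤ c ∧ c - k < row.length ∧ row.getD (c - k) '.' = '#' then
          PySem.Int.bor (cols.getD c 0) ((1 : Int) <<< r)
        else cols.getD c 0) := by
  intro row
  induction row with
  | nil =>
    intro k cols _
    refine ⟨rfl, fun c => ?_⟩
    have h0 : ¬ (k ≤ c ∧ c - k < ([] : List Char).length ∧ ([] : List Char).getD (c - k) '.' = '#') := by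
      simp
    rw [if_neg h0]
    rfl
  | cons x t ih =>
    intro k cols hlen
    have hk : k < cols.length := by simp at hlen; omega
    simp only [PySem.List.enumerate, List.foldl_cons]
    have hcast : (k : Int) + 1 = ((k + 1 : Nat) : Int) := by push_cast; ring
    rw [hcast]
    set v := PySem.Int.bor (PySem.List.pyGetD cols (k : Int) 0) ((1 : Int) <<< r) with hv
    set cols1 := if x = '#' then PySem.List.pySetD cols (k : Int) v else cols with hcols1
    have h1 : cols1.length = cols.length := by
      rw [hcols1]; split <;> simp
    have hgd : ∀ c : Nat, cols1.getD c 0 =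
        if c = k ∧ x = '#' then PySem.Int.bor (cols.getD c 0) ((1 : Int) <<< r)
        else cols.getD c 0 := by
      intro c
      rw [hcols1]
      by_cases hx : x = '#'
      · subst hx
        have h2 := PySem.List.pyGetD_pySetD_natCast cols k c v 0 hk
        simp only [PySem.List.pyGetD_natCast] at h2
        rw [if_pos rfl, h2, hv]
        simp only [PySem.List.pyGetD_natCast]
        by_cases hc : c = k
        · subst hc; simp
        · simp [hc]
      · simp [hx]
    have hlen1 : (k + 1) + t.length ≤ cols1.length := by
      rw [h1]; simp at hlen; omega
    obtain ⟨ihlen, ihget⟩ := ih (k + 1) cols1 hlen1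
    refine ⟨ihlen.trans h1, fun c => ?_⟩
    rw [ihget c, hgd c]
    rcases Nat.lt_trichotomy c k with hc | hc | hc
    · have e1 : ¬ (k + 1 ≤ c ∧ c - (k + 1) < t.length ∧ t.getD (c - (k + 1)) '.' = '#') := by
        intro h; omega
      have e2 : ¬ (c = k ∧ x = '#') := by intro h; omega
      have e3 : ¬ (k ≤ c ∧ c - k < t.length + 1 ∧ (x :: t).getD (c - k) '.' = '#') := by
        intro h; omega
      simp only [if_neg e1, if_neg e2, List.length_cons, if_neg e3]
    · subst hc
      have e1 : ¬ (c + 1 ≤ c ∧ c - (c + 1) < t.length ∧ t.getD (c - (c + 1)) '.' = '#') := by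
        intro h; omega
      rw [if_neg e1]
      simp
    · have e2 : ¬ (c = k ∧ x = '#') := by intro h; omega
      rw [if_neg e2]
      have e5 : c - k = (c - (k + 1)) + 1 := by omega
      simp only [List.length_cons, e5, List.getD_cons_succ]
      have e6 : (k + 1 ≤ c ∧ c - (k + 1) < t.length ∧ t.getD (c - (k + 1)) '.' = '#')
          ↔ (k ≤ c ∧ (c - (k + 1)) + 1 < t.length + 1 ∧ t.getD (c - (k + 1)) '.' = '#') := by
        constructor <;> (intro h; exact ⟨by omega, by omega, h.2.2⟩)
      split_ifs with p q q <;> first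
        | rfl
        | (exact absurd (e6.mp p) q)
        | (exact absurd (e6.mpr q) p)

-- pvScatterRow specialised to B's inner loop (column enumeration starts at 0)
theorem pvScatterRowFn_spec (r : Nat) (cols : List Int) (row : List Char)
    (h : row.length ≤ cols.length) :
    (pvScatterRowFn r cols row).length = cols.length ∧
    ∀ c : Nat, (pvScatterRowFn r cols row).getD c 0 = pvStep row r c (cols.getD c 0) := by
  obtain ⟨hl, hg⟩ := pvScatterRow r row 0 cols (by omega)
  simp only [Nat.cast_zero] at hl hg
  refine ⟨hl, fun c => ?_⟩
  rw [show pvScatterRowFn r cols row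
      = (PySem.List.enumerate row 0).foldl (fun cols q =>
        if q.2 = '#' then
          PySem.List.pySetD cols q.1
            (PySem.Int.bor (PySem.List.pyGetD cols q.1 0) ((1 : Int) <<< r))
        else cols) cols from rfl]
  rw [hg c, pvStep]
  by_cases hc : c < row.length
  · rw [if_pos hc]
    by_cases hch : row.getD c '.' = '#'
    · rw [if_pos (by exact ⟨by omega, by simpa using hc, by simpa using hch⟩), if_pos hch]
    · rw [if_neg (fun h => hch (by simpa using h.2.2)), if_neg hch]
  · rw [if_neg (fun h => hc (by omega)), if_neg hc]
    simp

-- effect of B's outer loop: after scattering all rows (first row index k), column c holds pvG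
theorem pvScatterAll : ∀ (rows : List String) (k : Nat) (cols : List Int),
    (∀ s ∈ rows, s.toList.length ≤ cols.length) →
    (((PySem.List.enumerate rows (k : Int)).foldl
        (fun cols p => pvScatterRowFn p.1.toNat cols p.2.toList) cols).length = cols.length ∧
     ∀ c : Nat, ((PySem.List.enumerate rows (k : Int)).foldl
        (fun cols p => pvScatterRowFn p.1.toNat cols p.2.toList) cols).getD c 0
        = pvG rows k c (cols.getD c 0)) := by
  intro rows
  induction rows with
  | nil => intro k cols _; exact ⟨rfl, fun c => rfl⟩
  | cons row rest ih =>
    intro k cols hlen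
    simp only [PySem.List.enumerate, List.foldl_cons, Int.toNat_natCast]
    have hcast : (k : Int) + 1 = ((k + 1 : Nat) : Int) := by push_cast; ring
    rw [hcast]
    have hrow : row.toList.length ≤ cols.length := hlen row (List.mem_cons_self ..)
    obtain ⟨rlen, rget⟩ := pvScatterRowFn_spec k cols row.toList hrow
    have hlen1 : ∀ s ∈ rest, s.toList.length ≤ (pvScatterRowFn k cols row.toList).length := by
      intro s hs; rw [rlen]; exact hlen s (List.mem_cons_of_mem _ hs)
    obtain ⟨ihlen, ihget⟩ := ih (k + 1) (pvScatterRowFn k cols row.toList) hlen1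
    refine ⟨ihlen.trans rlen, fun c => ?_⟩
    rw [ihget c, rget c]
    rfl

-- every row length is bounded by w = max of lengths (rows nonempty)
theorem pvMaxBound (rows : List String) (hne : rows ≠ []) :
    ∀ s ∈ rows, s.toList.length ≤ ((rows.map (fun r => r.toList.length)).max?).getD 0 := by
  intro s hs
  obtain ⟨m, hm⟩ : ∃ m, (rows.map (fun r => r.toList.length)).max? = some m := by
    cases h : (rows.map (fun r => r.toList.length)).max? with
    | none =>
      rw [List.max?_eq_none_iff] at h
      exact absurd (List.map_eq_nil_iff.mp h) hne
    | some m => exact ⟨m, rfl⟩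
  rw [hm]
  have h2 := (List.max?_eq_some_iff (xs := rows.map (fun r => r.toList.length))).mp hm
  exact h2.2 _ (List.mem_map_of_mem hs)

-- ===== VERDICT (by name: the statement is the Claim_ definition above) =====
theorem compile_frame_py_spec : Claim_equal_compile_frame_py := by
  intro rows _ hpre
  unfold Spec_compile_frame_py
  set w := ((rows.map (fun r => r.toList.length)).max?).getD 0 with hw
  have hB : compile_frame_py_alt rows
      = (PySem.List.enumerate rows ((0 : Nat) : Int)).foldl
          (fun cols p => pvScatterRowFn p.1.toNat cols p.2.toList)
          (List.replicate w 0) := rfl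
  have hbound : ∀ s ∈ rows, s.toList.length ≤ (List.replicate w (0 : Int)).length := by
    intro s hs; rw [List.length_replicate]; exact pvMaxBound rows hpre s hs
  obtain ⟨blen, bget⟩ := pvScatterAll rows 0 (List.replicate w 0) hbound
  rw [pvLemA rows, ← hw, hB]
  apply List.ext_getElem
  · rw [blen]; simp
  · intro c h1 h2
    rw [List.getElem_map, List.getElem_range]
    rw [← List.getD_eq_getElem _ 0 h2, bget c]
    simp
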